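-- pv_equiv track=rewrite | github.com/SeminKim/BOJ-practice | BOJ/2108/1035.py | check
-- ===== SOURCE A (Python) =====
-- def check(selection):
--     x = len(selection)
--     connected = [False for _ in range(x)]
--     connected[0] = True
--     Q = [0]
--     while Q:
--         curr = Q.pop()
--         for nxt in range(x):
--             if distance(selection[curr], selection[nxt]) == 1 and not connected[nxt]:
--                 connected[nxt] = True
--                 Q.append(nxt)
--     return all(connected)
--
-- def distance(first, second):
--     r1, c1 = first // 5, first % 5
--     r2, c2 = second // 5, second % 5
--     return abs(r1 - r2) + abs(c1 - c2)
-- ===== SOURCE B (Python) =====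
-- def check(selection):
--     x = len(selection)
--     reach = [i == 0 for i in range(x)]
--     while True:
--         new = [reach[j] or any(reach[i] and distance(selection[i], selection[j]) == 1 for i in range(x))
--                for j in range(x)]
--         if new == reach:
--             break
--         reach = new
--     return all(reach)
--
-- def distance(first, second):
--     r1, c1 = first // 5, first % 5
--     r2, c2 = second // 5, second % 5
--     return abs(r1 - r2) + abs(c1 - c2)
-- ===== Notes on version B (the rewrite author's own statement) =====
-- stated objective: alternative
-- what changed: Replaces the mutating stack-worklist DFS (visited array + explicit stack with pop/append) by a pure saturation loop: repeatedly expand the whole reachable-set vector by one adjacency step until it stops changing, then all().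
import Mathlib
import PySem

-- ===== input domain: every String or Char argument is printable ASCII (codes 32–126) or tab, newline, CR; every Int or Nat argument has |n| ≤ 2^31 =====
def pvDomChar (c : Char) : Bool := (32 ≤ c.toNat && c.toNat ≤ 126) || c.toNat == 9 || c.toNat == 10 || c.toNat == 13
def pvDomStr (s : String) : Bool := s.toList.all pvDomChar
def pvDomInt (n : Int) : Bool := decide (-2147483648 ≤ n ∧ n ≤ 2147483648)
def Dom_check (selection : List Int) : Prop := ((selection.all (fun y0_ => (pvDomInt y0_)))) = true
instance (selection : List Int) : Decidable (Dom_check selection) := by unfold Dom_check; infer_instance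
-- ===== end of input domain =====

-- B replaces A's mutating stack-worklist DFS by a pure round-based fixed-point iteration (alternative
-- decomposition, not faster); both compute the same reachable-from-0 set, so the returned Bool agrees.

-- ===== PORT A =====
def distance (first second : Int) : Int :=
  let r1 := PySem.Int.floordiv first 5
  let c1 := PySem.Int.mod first 5
  let r2 := PySem.Int.floordiv second 5
  let c2 := PySem.Int.mod second 5
  |r1 - r2| + |c1 - c2|

-- body of the 'for nxt in range(x)' loop; `getD nxt true` defaults to true out of range, which is
-- unreachable in Python (nxt < len(connected) always) and doubles as the totality guard of the measure
def bfsStep (sel : List Int) (curr : Nat) (st : List Bool × List Nat) (nxt : Nat) :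
    List Bool × List Nat :=
  if distance (sel.getD curr 0) (sel.getD nxt 0) = 1 ∧ st.1.getD nxt true = false
  then (st.1.set nxt true, nxt :: st.2) else st

-- one flip removes one `false` from the visited array (termination measure bookkeeping)
lemma count_false_set (c : List Bool) (n : Nat) (h : c.getD n true = false) :
    (c.set n true).count false + 1 = c.count false := by
  induction c generalizing n with
  | nil => simp [List.getD] at h
  | cons b t ih =>
    cases n with
    | zero => simp [List.getD] at h; subst h; simp
    | succ m =>
      simp only [List.getD] at h
      have := ih m h
      simp only [List.set, List.count_cons]
      omega

lemma fold_measure (sel : List Int) (curr : Nat) (l : List Nat) (st : List Bool × List Nat) :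
    2 * (l.foldl (bfsStep sel curr) st).1.count false + (l.foldl (bfsStep sel curr) st).2.length
      ≤ 2 * st.1.count false + st.2.length := by
  induction l generalizing st with
  | nil => simp
  | cons a l ih =>
    simp only [List.foldl_cons]
    refine le_trans (ih _) ?_
    unfold bfsStep
    split_ifs with h
    · have := count_false_set st.1 a h.2
      simp only [List.length_cons]
      omega
    · exact le_rfl

-- the 'while Q:' loop; the Lean list stores the Python stack reversed (head = top), so
-- Python's pop() from the end is head-matching and append is cons (same visit order)
def bfsLoop (sel : List Int) (x : Nat) (connected : List Bool) (Q : List Nat) : List Bool :=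
  match Q with
  | [] => connected
  | curr :: rest =>
    let st := (List.range x).foldl (bfsStep sel curr) (connected, rest)
    bfsLoop sel x st.1 st.2
termination_by 2 * connected.count false + Q.length
decreasing_by
  have := fold_measure sel curr (List.range x) (connected, rest)
  simp only [List.length_cons] at *
  omega

def check (selection : List Int) : Bool :=
  let x := selection.length
  let connected := (List.range x).map (fun _ => false)
  let connected := connected.set 0 true   -- Python raises IndexError here when x = 0 (excluded by Pre_)
  bfsLoop selection x connected [0] |>.all (fun b => b)

-- ===== PORT B =====
def reachStep (selection : List Int) (x : Nat) (reach : List Bool) : List Bool :=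
  (List.range x).map (fun j => reach.getD j false ||
    (List.range x).any (fun i =>
      reach.getD i false && (distance (selection.getD i 0) (selection.getD j 0) == 1)))

-- the 'while True' loop; fuel x+1 is a totality guard only: the saturation provably
-- stabilizes within x rounds (satB_eq below), so the fuel never runs out
def satB (sel : List Int) (fuel : Nat) (r : List Bool) : List Bool :=
  match fuel with
  | 0 => r
  | f + 1 =>
    let r2 := reachStep sel sel.length r
    if r2 = r then r else satB sel f r2

def check_alt (selection : List Int) : Bool :=
  let x := selection.length
  let init := (List.range x).map (fun i => decide (i = 0))
  (satB selection (x + 1) init).all (fun b => b)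

-- ===== PRECONDITION & SPEC =====
-- Pre_ excludes only the empty list, on which Python A raises IndexError at 'connected[0] = True'.
def Pre_check (selection : List Int) : Prop := selection ≠ []
instance (selection : List Int) : Decidable (Pre_check selection) := by unfold Pre_check; infer_instance
def pvWitness_check : List Int := [0, 1, 7]

def Spec_check (selection : List Int) (out : Bool) : Prop := out = check_alt selection
instance (selection : List Int) (out : Bool) : Decidable (Spec_check selection out) := by unfold Spec_check; infer_instance

-- ===== CLAIM (what is proved, stated in full; the proofs are below) =====
def Claim_equal_check : Prop := ∀ (selection : List Int), Dom_check selection → Pre_check selection → Spec_check selection (check selection)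

-- ===== LEMMAS AND PROOFS =====

-- the adjacency relation both programs explore, and reachability from index 0
def adjB (sel : List Int) (i j : Nat) : Bool :=
  distance (sel.getD i 0) (sel.getD j 0) == 1

def rrel (sel : List Int) (i j : Nat) : Prop :=
  i < sel.length ∧ j < sel.length ∧ adjB sel i j = true

def Reach (sel : List Int) (j : Nat) : Prop := Relation.ReflTransGen (rrel sel) 0 j


-- ---- generic getD toolbox (facts specific to the Bool-array encoding both ports use) ----

lemma getD_false_lt (c : List Bool) (j : Nat) (h : c.getD j false = true) : j < c.length := by
  by_contra hc
  rw [List.getD_eq_default c false (by omega)] at h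
  simp at h

lemma getD_true_elim (c : List Bool) (n : Nat) (h : c.getD n true = false) :
    n < c.length ∧ c.getD n false = false := by
  by_cases hn : n < c.length
  · refine ⟨hn, ?_⟩
    rw [List.getD_eq_getElem c true hn] at h
    rw [List.getD_eq_getElem c false hn]
    exact h
  · rw [List.getD_eq_default c true (by omega)] at h
    simp at h

lemma getD_set_self (c : List Bool) (n : Nat) (h : n < c.length) :
    (c.set n true).getD n false = true := by
  rw [List.getD_eq_getElem?_getD, List.getElem?_set_self (by omega)]
  simp

lemma getD_set_ne (c : List Bool) (n m : Nat) (b : Bool) (h : m ≠ n) :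
    (c.set n b).getD m false = c.getD m false := by
  rw [List.getD_eq_getElem?_getD, List.getElem?_set_ne (by omega), ← List.getD_eq_getElem?_getD]

lemma getD_map_range' (n j : Nat) (f : Nat → Bool) :
    ((List.range n).map f).getD j false = if j < n then f j else false := by
  rcases Nat.lt_or_ge j n with h | h
  · rw [List.getD_eq_getElem]
    · simp [h]
    · simpa using h
  · rw [List.getD_eq_default]
    · simp
      omega
    · simpa using h

-- ---- A-side: properties of the inner 'for nxt in range(x)' fold ----

lemma step_len (sel : List Int) (curr : Nat) (st : List Bool × List Nat) (a : Nat) :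
    (bfsStep sel curr st a).1.length = st.1.length := by
  unfold bfsStep
  split_ifs <;> simp

lemma foldA_len (sel : List Int) (curr : Nat) (l : List Nat) (st : List Bool × List Nat) :
    (l.foldl (bfsStep sel curr) st).1.length = st.1.length := by
  induction l generalizing st with
  | nil => rfl
  | cons a l ih =>
    simp only [List.foldl_cons]
    rw [ih]
    exact step_len sel curr st a

lemma foldA_mono (sel : List Int) (curr : Nat) (l : List Nat) (st : List Bool × List Nat)
    (j : Nat) (h : st.1.getD j false = true) :
    (l.foldl (bfsStep sel curr) st).1.getD j false = true := by
  induction l generalizing st with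
  | nil => exact h
  | cons a l ih =>
    simp only [List.foldl_cons]
    apply ih
    unfold bfsStep
    split_ifs with hc
    · by_cases hj : j = a
      · subst hj
        exact getD_set_self _ _ (getD_true_elim _ _ hc.2).1
      · rw [getD_set_ne _ _ _ _ hj]
        exact h
    · exact h

lemma foldA_qsub (sel : List Int) (curr : Nat) (l : List Nat) (st : List Bool × List Nat)
    (q : Nat) (h : q ∈ st.2) : q ∈ (l.foldl (bfsStep sel curr) st).2 := by
  induction l generalizing st with
  | nil => exact h
  | cons a l ih =>
    simp only [List.foldl_cons]
    apply ih
    unfold bfsStep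
    split_ifs with hc
    · exact List.mem_cons_of_mem _ h
    · exact h

lemma foldA_qchar (sel : List Int) (curr : Nat) (l : List Nat) (st : List Bool × List Nat)
    (q : Nat) (h : q ∈ (l.foldl (bfsStep sel curr) st).2) :
    q ∈ st.2 ∨ (q ∈ l ∧ (l.foldl (bfsStep sel curr) st).1.getD q false = true) := by
  induction l generalizing st with
  | nil => exact Or.inl h
  | cons a l ih =>
    simp only [List.foldl_cons] at h ⊢
    rcases ih _ h with h2 | ⟨hm, ht⟩
    · revert h2
      unfold bfsStep
      split_ifs with hc
      · intro h2
        rcases List.mem_cons.mp h2 with rfl | h3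
        · refine Or.inr ⟨List.mem_cons_self, ?_⟩
          apply foldA_mono
          exact getD_set_self _ _ (getD_true_elim _ _ hc.2).1
        · exact Or.inl h3
      · exact fun h2 => Or.inl h2
    · exact Or.inr ⟨List.mem_cons_of_mem _ hm, ht⟩

lemma foldA_new (sel : List Int) (curr : Nat) (l : List Nat) (st : List Bool × List Nat)
    (j : Nat) (h : (l.foldl (bfsStep sel curr) st).1.getD j false = true) :
    st.1.getD j false = true ∨ j ∈ (l.foldl (bfsStep sel curr) st).2 := by
  induction l generalizing st with
  | nil => exact Or.inl h
  | cons a l ih =>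
    simp only [List.foldl_cons] at h ⊢
    rcases ih _ h with h2 | h2
    · revert h2
      unfold bfsStep
      split_ifs with hc
      · intro h2
        by_cases hj : j = a
        · subst hj
          exact Or.inr (foldA_qsub _ _ _ _ _ List.mem_cons_self)
        · exact Or.inl (by rw [getD_set_ne _ _ _ _ hj] at h2; exact h2)
      · exact Or.inl
    · exact Or.inr h2

lemma foldA_cover (sel : List Int) (curr : Nat) (l : List Nat) (st : List Bool × List Nat)
    (nxt : Nat) (hm : nxt ∈ l) (hlt : nxt < st.1.length)
    (hadj : distance (sel.getD curr 0) (sel.getD nxt 0) = 1) :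
    (l.foldl (bfsStep sel curr) st).1.getD nxt false = true := by
  induction l generalizing st with
  | nil => cases hm
  | cons a l ih =>
    simp only [List.foldl_cons]
    rcases List.mem_cons.mp hm with rfl | hm2
    · apply foldA_mono
      by_cases hc : st.1.getD nxt true = false
      · unfold bfsStep
        rw [if_pos ⟨hadj, hc⟩]
        exact getD_set_self _ _ (getD_true_elim _ _ hc).1
      · have hT : st.1.getD nxt false = true := by
          rw [List.getD_eq_getElem _ _ hlt] at hc ⊢
          cases hv : st.1[nxt] with
          | false => exact absurd hv hc
          | true => rfl
        unfold bfsStep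
        split_ifs with h2
        · exact getD_set_self _ _ (getD_true_elim _ _ h2.2).1
        · exact hT
    · exact ih _ hm2 (by rw [step_len]; exact hlt)

lemma foldA_newadj (sel : List Int) (curr : Nat) (l : List Nat) (st : List Bool × List Nat)
    (j : Nat) (h : (l.foldl (bfsStep sel curr) st).1.getD j false = true) :
    st.1.getD j false = true ∨
      (j < st.1.length ∧ distance (sel.getD curr 0) (sel.getD j 0) = 1) := by
  induction l generalizing st with
  | nil => exact Or.inl h
  | cons a l ih =>
    simp only [List.foldl_cons] at h
    rcases ih _ h with h2 | ⟨hlt, hadj⟩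
    · revert h2
      unfold bfsStep
      split_ifs with hc
      · intro h2
        by_cases hj : j = a
        · subst hj
          exact Or.inr ⟨(getD_true_elim _ _ hc.2).1, hc.1⟩
        · exact Or.inl (by rw [getD_set_ne _ _ _ _ hj] at h2; exact h2)
      · exact Or.inl
    · refine Or.inr ⟨?_, hadj⟩
      rw [step_len] at hlt
      exact hlt

-- ---- A-side: the outer while-loop computes exactly the reachable set ----

lemma bfsLoop_len (sel : List Int) (x : Nat) (c : List Bool) (Q : List Nat) :
    (bfsLoop sel x c Q).length = c.length := by
  induction c, Q using bfsLoop.induct sel x with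
  | case1 c => simp [bfsLoop]
  | case2 c curr rest st ih =>
    rw [bfsLoop]
    exact ih.trans (foldA_len sel curr (List.range x) (c, rest))

lemma bfsLoop_char (sel : List Int) (c : List Bool) (Q : List Nat) :
    c.length = sel.length →
    c.getD 0 false = true →
    (∀ j, c.getD j false = true → Reach sel j) →
    (∀ q ∈ Q, q < sel.length ∧ c.getD q false = true) →
    (∀ i, c.getD i false = true → i ∈ Q ∨ ∀ j, rrel sel i j → c.getD j false = true) →
    ∀ j, ((bfsLoop sel sel.length c Q).getD j false = true ↔ (Reach sel j ∧ j < sel.length)) := by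
  induction c, Q using bfsLoop.induct sel sel.length with
  | case1 c =>
    intro hlen h0 hsound _ hclosed j
    rw [bfsLoop]
    constructor
    · intro h
      exact ⟨hsound j h, hlen ▸ getD_false_lt c j h⟩
    · rintro ⟨hr, -⟩
      induction hr with
      | refl => exact h0
      | tail _ h2 ihb =>
        rcases hclosed _ ihb with hmem | hcl
        · cases hmem
        · exact hcl _ h2
  | case2 c curr rest st ih =>
    intro hlen h0 hsound hq hclosed
    rw [bfsLoop]
    have hcurr := hq curr List.mem_cons_self
    have hreachCurr : Reach sel curr := hsound curr hcurr.2
    apply ih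
    · exact (foldA_len sel curr (List.range sel.length) (c, rest)).trans hlen
    · exact foldA_mono sel curr _ _ _ h0
    · -- soundness
      intro j hj
      rcases foldA_newadj sel curr _ _ j hj with h2 | ⟨hjl, hadj⟩
      · exact hsound j h2
      · refine Relation.ReflTransGen.tail hreachCurr ⟨hcurr.1, hlen ▸ hjl, ?_⟩
        simpa [adjB] using hadj
    · -- queue invariant
      intro q hqm
      rcases foldA_qchar sel curr _ _ q hqm with h2 | ⟨hm, ht⟩
      · have := hq q (List.mem_cons_of_mem _ h2)
        exact ⟨this.1, foldA_mono sel curr _ _ _ this.2⟩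
      · exact ⟨List.mem_range.mp hm, ht⟩
    · -- closedness invariant
      intro i hi
      rcases foldA_new sel curr _ _ i hi with hci | hiq
      · rcases hclosed i hci with hmem | hcl
        · rcases List.mem_cons.mp hmem with rfl | hrest
          · refine Or.inr ?_
            intro j hr
            rcases hr with ⟨_, hjn, hadj⟩
            refine foldA_cover sel i (List.range sel.length) (c, rest) j
              (List.mem_range.mpr hjn) (by simpa [hlen] using hjn) ?_
            simpa [adjB] using hadj
          · exact Or.inl (foldA_qsub sel curr _ _ _ hrest)
        · exact Or.inr fun j hr => foldA_mono sel curr _ _ _ (hcl j hr)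
      · exact Or.inl hiq

-- ---- B-side: the n-round saturation computes exactly the reachable set ----

def initB (sel : List Int) : List Bool := (List.range sel.length).map (fun i => decide (i = 0))

def SkB (sel : List Int) (k : Nat) : List Bool := (reachStep sel sel.length)^[k] (initB sel)

lemma reachStep_getD (sel : List Int) (r : List Bool) (j : Nat) :
    (reachStep sel sel.length r).getD j false =
      if j < sel.length then
        (r.getD j false || (List.range sel.length).any (fun i =>
          r.getD i false && (distance (sel.getD i 0) (sel.getD j 0) == 1)))
      else false := by
  unfold reachStep
  exact getD_map_range' _ _ _

lemma SkB_len (sel : List Int) (k : Nat) : (SkB sel k).length = sel.length := by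
  induction k with
  | zero => simp [SkB, initB]
  | succ k ih =>
    rw [SkB, Function.iterate_succ_apply']
    simp [reachStep]

lemma SkB_zero_getD (sel : List Int) (j : Nat) :
    (SkB sel 0).getD j false = if j < sel.length then decide (j = 0) else false := by
  rw [SkB, Function.iterate_zero_apply, initB]
  exact getD_map_range' _ _ _

lemma SkB_mono (sel : List Int) (k : Nat) (j : Nat) (h : (SkB sel k).getD j false = true) :
    (SkB sel (k + 1)).getD j false = true := by
  have hj : j < sel.length := SkB_len sel k ▸ getD_false_lt _ _ h
  rw [SkB, Function.iterate_succ_apply', ← SkB, reachStep_getD, if_pos hj, h]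
  simp

lemma SkB_chain (sel : List Int) (k : Nat) (j : Nat)
    (h : (SkB sel k).getD j false = true) :
    ∀ m, k ≤ m → (SkB sel m).getD j false = true := by
  intro m
  induction m with
  | zero =>
    intro hm
    have hk : k = 0 := by omega
    exact hk ▸ h
  | succ m ih =>
    intro hm
    rcases Nat.lt_or_ge k (m + 1) with hlt | hge
    · exact SkB_mono sel m j (ih (by omega))
    · have hk : k = m + 1 := by omega
      exact hk ▸ h

lemma SkB_sound (sel : List Int) (k : Nat) (j : Nat)
    (h : (SkB sel k).getD j false = true) : Reach sel j := by
  induction k generalizing j with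
  | zero =>
    rw [SkB_zero_getD] at h
    split_ifs at h with hj
    · have : j = 0 := by simpa using h
      exact this ▸ Relation.ReflTransGen.refl
  | succ k ih =>
    rw [SkB, Function.iterate_succ_apply', ← SkB, reachStep_getD] at h
    split_ifs at h with hj
    · rcases Bool.or_eq_true_iff.mp h with h1 | h1
      · exact ih j h1
      · rcases List.any_eq_true.mp h1 with ⟨i, hi, hpred⟩
        rcases Bool.and_eq_true_iff.mp hpred with ⟨hri, hadj⟩
        exact Relation.ReflTransGen.tail (ih i hri) ⟨List.mem_range.mp hi, hj, hadj⟩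

lemma count_true_lt (a : List Bool) (b : List Bool) (hlen : a.length = b.length)
    (hmono : ∀ j, a.getD j false = true → b.getD j false = true) (hne : a ≠ b) :
    a.count true < b.count true := by
  induction a generalizing b with
  | nil =>
    cases b with
    | nil => exact absurd rfl hne
    | cons y b => simp at hlen
  | cons x a ih =>
    cases b with
    | nil => simp at hlen
    | cons y b =>
      have h0 : x = true → y = true := fun hx => by
        simpa [List.getD] using hmono 0 (by simpa [List.getD] using hx)
      have htl : ∀ j, a.getD j false = true → b.getD j false = true := by
        intro j hj
        simpa [List.getD] using hmono (j + 1) (by simpa [List.getD] using hj)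
      by_cases hab : a = b
      · subst hab
        have hxy : x ≠ y := fun h => hne (by rw [h])
        cases x <;> cases y <;> simp_all
      · have hcnt := ih b (by simpa using hlen) htl hab
        cases x with
        | false =>
          have h1 : (false :: a).count true = a.count true := by simp
          have h2 : b.count true ≤ (y :: b).count true := by cases y <;> simp
          omega
        | true =>
          have hy := h0 rfl
          subst hy
          have h1 : (true :: a).count true = a.count true + 1 := by simp
          have h2 : (true :: b).count true = b.count true + 1 := by simp
          omega

lemma SkB_succ (sel : List Int) (m : Nat) :
    SkB sel (m + 1) = reachStep sel sel.length (SkB sel m) :=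
  Function.iterate_succ_apply' _ _ _

lemma SkB_fixed_from (sel : List Int) (k : Nat)
    (hfix : reachStep sel sel.length (SkB sel k) = SkB sel k) :
    ∀ d, SkB sel (d + k) = SkB sel k := by
  intro d
  induction d with
  | zero => simp
  | succ d ih =>
    rw [show d + 1 + k = (d + k) + 1 by omega, SkB_succ, ih, hfix]

lemma SkB_fix (sel : List Int) (hn : sel ≠ []) :
    reachStep sel sel.length (SkB sel sel.length) = SkB sel sel.length := by
  have hpos : 0 < sel.length := List.length_pos_iff.mpr hn
  have hex : ∃ k, k < sel.length ∧ SkB sel k = SkB sel (k + 1) := by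
    by_contra hno
    push Not at hno
    have haux : ∀ k, k ≤ sel.length → k + 1 ≤ (SkB sel k).count true := by
      intro k
      induction k with
      | zero =>
        intro _
        have h0 : (SkB sel 0).getD 0 false = true := by
          rw [SkB_zero_getD, if_pos hpos]
          simp
        have hmem : true ∈ SkB sel 0 := by
          rw [List.getD_eq_getElem _ _ (by rw [SkB_len]; exact hpos)] at h0
          exact h0 ▸ List.getElem_mem _
        simpa using List.count_pos_iff.mpr hmem
      | succ k ih =>
        intro hk
        have h1 := ih (by omega)
        have h2 := count_true_lt (SkB sel k) (SkB sel (k + 1))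
          (by rw [SkB_len, SkB_len]) (SkB_mono sel k) (hno k (by omega))
        omega
    have hcap : (SkB sel sel.length).count true ≤ sel.length := by
      have := List.count_le_length (a := true) (l := SkB sel sel.length)
      rwa [SkB_len] at this
    have := haux sel.length le_rfl
    omega
  rcases hex with ⟨k, hk, hstable⟩
  have hfix : reachStep sel sel.length (SkB sel k) = SkB sel k := by
    rw [← SkB_succ sel k]
    exact hstable.symm
  have hkn : SkB sel sel.length = SkB sel k := by
    have h5 := SkB_fixed_from sel k hfix (sel.length - k)
    rwa [show sel.length - k + k = sel.length by omega] at h5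
  rw [hkn]
  exact hfix

lemma SkB_ge (sel : List Int) (hn : sel ≠ []) (m : Nat) (h : sel.length ≤ m) :
    SkB sel m = SkB sel sel.length := by
  have h2 := SkB_fixed_from sel sel.length (SkB_fix sel hn) (m - sel.length)
  rwa [show m - sel.length + sel.length = m by omega] at h2

lemma satB_eq (sel : List Int) (hn : sel ≠ []) :
    ∀ f k, sel.length ≤ k + f → satB sel f (SkB sel k) = SkB sel sel.length := by
  intro f
  induction f with
  | zero =>
    intro k h
    exact SkB_ge sel hn k (by omega)
  | succ f ih =>
    intro k h
    have hstep : satB sel (f + 1) (SkB sel k)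
        = if SkB sel (k + 1) = SkB sel k then SkB sel k else satB sel f (SkB sel (k + 1)) := by
      rw [satB, ← SkB_succ]
    rw [hstep]
    split_ifs with hs
    · have hfix : reachStep sel sel.length (SkB sel k) = SkB sel k := by
        rw [← SkB_succ]
        exact hs
      rcases Nat.le_total k sel.length with hk | hk
      · have h2 := SkB_fixed_from sel k hfix (sel.length - k)
        rw [show sel.length - k + k = sel.length by omega] at h2
        exact h2.symm
      · exact SkB_ge sel hn k hk
    · exact ih (k + 1) (by omega)

lemma SkB_complete (sel : List Int) (hn : sel ≠ []) (j : Nat) (hr : Reach sel j)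
    (hj : j < sel.length) : (SkB sel sel.length).getD j false = true := by
  induction hr with
  | refl =>
    refine SkB_chain sel 0 0 ?_ sel.length (Nat.zero_le _)
    rw [SkB_zero_getD, if_pos (List.length_pos_iff.mpr hn)]
    simp
  | tail _ h2 ihb =>
    rcases h2 with ⟨hbn, hjn, hadj⟩
    have hb := ihb hbn
    conv_lhs => rw [← SkB_fix sel hn]
    rw [reachStep_getD, if_pos hjn]
    refine Bool.or_eq_true_iff.mpr (Or.inr ?_)
    exact List.any_eq_true.mpr ⟨_, List.mem_range.mpr hbn, Bool.and_eq_true_iff.mpr ⟨hb, hadj⟩⟩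

-- ---- assembling the two characterizations ----

lemma c0_getD (sel : List Int) (hpos : 0 < sel.length) (j : Nat) :
    (((List.range sel.length).map (fun _ => false)).set 0 true).getD j false = true ↔ j = 0 := by
  constructor
  · intro h
    by_contra hj
    rw [getD_set_ne _ _ _ _ hj, getD_map_range'] at h
    split_ifs at h
  · rintro rfl
    exact getD_set_self _ _ (by simpa using hpos)

lemma check_eq_alt (sel : List Int) (hn : sel ≠ []) : check sel = check_alt sel := by
  have hpos : 0 < sel.length := List.length_pos_iff.mpr hn
  have hA : ∀ j, ((bfsLoop sel sel.length (((List.range sel.length).map (fun _ => false)).set 0 true) [0]).getD j false = true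
      ↔ (Reach sel j ∧ j < sel.length)) := by
    apply bfsLoop_char
    · simp
    · exact (c0_getD sel hpos 0).mpr rfl
    · intro j hj
      rw [c0_getD sel hpos] at hj
      exact hj ▸ Relation.ReflTransGen.refl
    · intro q hq
      rcases List.mem_singleton.mp hq with rfl
      exact ⟨hpos, (c0_getD sel hpos 0).mpr rfl⟩
    · intro i hi
      exact Or.inl (by rw [c0_getD sel hpos] at hi; simp [hi])
  have hB : ∀ j, ((SkB sel sel.length).getD j false = true ↔ (Reach sel j ∧ j < sel.length)) := by
    intro j
    constructor
    · intro h
      exact ⟨SkB_sound sel sel.length j h, SkB_len sel sel.length ▸ getD_false_lt _ _ h⟩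
    · rintro ⟨hr, hj⟩
      exact SkB_complete sel hn j hr hj
  have hlist : bfsLoop sel sel.length (((List.range sel.length).map (fun _ => false)).set 0 true) [0]
      = SkB sel sel.length := by
    apply List.ext_getElem
    · rw [bfsLoop_len, SkB_len]
      simp
    · intro j h1 h2
      rw [← List.getD_eq_getElem _ false h1, ← List.getD_eq_getElem _ false h2]
      exact Bool.coe_iff_coe.mp ((hA j).trans (hB j).symm)
  show (bfsLoop sel sel.length (((List.range sel.length).map (fun _ => false)).set 0 true) [0]).all (fun b => b)
      = (satB sel (sel.length + 1) ((List.range sel.length).map (fun i => decide (i = 0)))).all (fun b => b)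
  rw [hlist,
    show (List.range sel.length).map (fun i => decide (i = 0)) = SkB sel 0 from rfl,
    satB_eq sel hn (sel.length + 1) 0 (by omega)]

-- ===== VERDICT (by name: the statement is the Claim_ definition above) =====
theorem check_spec : Claim_equal_check := by
  unfold Claim_equal_check
  intro sel _ hpre
  unfold Spec_check
  exact check_eq_alt sel hpre
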